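-- pv_equiv track=rewrite | github.com/tamique-debrito/ML-Implements | DecisionTree/DecisionTree.py | labelsAllSame
-- ===== SOURCE A (Python) =====
-- def labelsAllSame(data):
--     """
--     Determines whether labels of a subset of data all agree.
--
--     data: the list of data being tested.
--
--     Returns a tuple (allSame, label).
--         allSame:        Boolean:    True if all labels are the same, false otherwise.
--         label:          Boolean:    If all labels are the same, is the value (True/False) of all labels.
--                                             If labels not all same, truth value of most common label
--     """
--     length = len(data)
--     numTrue = len([d for d in data if d[1] == True])
--     numFalse = length - numTrue
--     if numTrue == length:
--         return True, True
--     elif numFalse == length: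
--         return True, False
--     else:
--         return False, True if numTrue > numFalse else False
-- ===== SOURCE B (Python) =====
-- def labelsAllSame(data):
--     if not data:
--         return True, True
--     first = data[0][1] == True
--     allSame = all((d[1] == True) == first for d in data)
--     if allSame:
--         return True, first
--     numTrue = sum(1 for d in data if d[1] == True)
--     return False, 2 * numTrue > len(data)
-- ===== Notes on version B (the rewrite author's own statement) =====
-- stated objective: alternative
-- what changed: B short-circuits an all-same check against the first label and only counts True labels in the mixed case, instead of A's unconditional count-then-compare of numTrue/numFalse; ties resolve via 2*numTrue > len(data).
import Mathlib
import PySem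

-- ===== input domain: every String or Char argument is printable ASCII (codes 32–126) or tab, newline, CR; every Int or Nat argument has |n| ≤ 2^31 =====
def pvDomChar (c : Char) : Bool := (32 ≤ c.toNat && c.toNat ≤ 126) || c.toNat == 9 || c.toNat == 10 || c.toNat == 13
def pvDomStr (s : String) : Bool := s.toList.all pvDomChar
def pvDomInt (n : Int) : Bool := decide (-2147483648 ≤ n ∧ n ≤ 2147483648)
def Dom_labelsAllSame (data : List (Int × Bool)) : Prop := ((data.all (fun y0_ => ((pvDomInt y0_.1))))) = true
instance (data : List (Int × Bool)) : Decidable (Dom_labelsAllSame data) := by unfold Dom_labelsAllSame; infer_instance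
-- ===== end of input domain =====

-- B checks all-labels-equal-first with a short-circuit pass and counts True labels only in the mixed case, instead of A's unconditional count; same return values (alternative decomposition).


-- ===== PORT A =====
def labelsAllSame (data : List (Int × Bool)) : Bool × Bool :=
  let length : Int := data.length
  let numTrue : Int := (data.filter (fun d => d.2 == true)).length
  let numFalse : Int := length - numTrue
  if numTrue = length then (true, true)
  else if numFalse = length then (true, false)
  else (false, if numTrue > numFalse then true else false)

-- ===== PORT B =====
def labelsAllSame_alt (data : List (Int × Bool)) : Bool × Bool :=
  match data with
  | [] => (true, true)
  | d0 :: _ =>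
    let first : Bool := d0.2 == true
    let allSame : Bool := data.all (fun d => (d.2 == true) == first)
    if allSame then (true, first)
    else
      let numTrue : Int := (data.filter (fun d => d.2 == true)).length
      (false, decide (2 * numTrue > (data.length : Int)))

-- ===== PRECONDITION & SPEC =====
def Spec_labelsAllSame (data : List (Int × Bool)) (out : Bool × Bool) : Prop := out = labelsAllSame_alt data
instance (data : List (Int × Bool)) (out : Bool × Bool) : Decidable (Spec_labelsAllSame data out) := by unfold Spec_labelsAllSame; infer_instance

-- ===== CLAIM (what is proved, stated in full; the proofs are below) =====
def Claim_equal_labelsAllSame : Prop := ∀ (data : List (Int × Bool)), Dom_labelsAllSame data → Spec_labelsAllSame data (labelsAllSame data)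

-- ===== LEMMAS AND PROOFS =====

-- counting lemma: filter length = list length iff every label is true
theorem pv_filter_all {data : List (Int × Bool)} :
    ((data.filter (fun d => d.2 == true)).length = data.length) ↔ (∀ d ∈ data, d.2 = true) := by
  constructor
  · intro h d hd
    have := (List.length_filter_eq_length_iff).1 h d hd
    simpa using this
  · intro h
    apply (List.length_filter_eq_length_iff).2
    intro d hd; simpa using h d hd

theorem pv_filter_none {data : List (Int × Bool)} :
    ((data.filter (fun d => d.2 == true)).length = 0) ↔ (∀ d ∈ data, d.2 = false) := by
  rw [List.length_eq_zero_iff, List.filter_eq_nil_iff]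
  constructor
  · intro h d hd
    have := h d hd; simpa using this
  · intro h d hd; simpa using h d hd

-- ===== VERDICT (by name: the statement is the Claim_ definition above) =====
theorem labelsAllSame_spec : Claim_equal_labelsAllSame := by
  intro data _
  show labelsAllSame data = labelsAllSame_alt data
  cases data with
  | nil => decide
  | cons d0 rest =>
    simp only [labelsAllSame, labelsAllSame_alt]
    set L := d0 :: rest with hL
    have hlen : (0:Int) < L.length := by simp [hL]
    set k : Int := ((L.filter (fun d => d.2 == true)).length : Int) with hk
    by_cases hall : (L.all (fun d => (d.2 == true) == (d0.2 == true))) = true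
    · -- all labels equal the first
      have hmem : ∀ d ∈ L, d.2 = d0.2 := by
        intro d hd
        have := List.all_eq_true.1 hall d hd
        cases h1 : d.2 <;> cases h2 : d0.2 <;> simp [h1, h2] at this ⊢
      cases h0 : d0.2 with
      | true =>
        have hf : (L.filter (fun d => d.2 == true)).length = L.length :=
          pv_filter_all.2 (fun d hd => by rw [hmem d hd, h0])
        have hk1 : k = (L.length : Int) := by rw [hk]; exact_mod_cast hf
        rw [h0] at hall
        rw [if_pos hk1, if_pos hall]
        rfl
      | false =>
        have hf : (L.filter (fun d => d.2 == true)).length = 0 :=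
          pv_filter_none.2 (fun d hd => by rw [hmem d hd, h0])
        have hk0 : k = 0 := by rw [hk]; exact_mod_cast hf
        have hne : ¬ (k = (L.length : Int)) := by omega
        have hne2 : (L.length : Int) - k = (L.length : Int) := by omega
        rw [h0] at hall
        rw [if_neg hne, if_pos hne2, if_pos hall]
        rfl
    · -- mixed labels: k ≠ L.length and k ≠ 0
      have hdex : ∃ d ∈ L, ¬ ((d.2 == true) == (d0.2 == true)) = true := by
        by_contra hc
        push Not at hc
        exact hall (List.all_eq_true.2 (fun d hd => hc d hd))
      obtain ⟨d, hd, hdne⟩ := hdex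
      have hdne' : d.2 ≠ d0.2 := by
        intro h; apply hdne; simp [h]
      have hkL : k ≠ (L.length : Int) := by
        intro h
        have h2 : ((List.filter (fun d => d.2 == true) L).length : Int) = (L.length : Int) := by
          rw [← hk]; exact h
        have hall' : ∀ e ∈ L, e.2 = true := pv_filter_all.1 (by exact_mod_cast h2)
        exact hdne' ((hall' d hd).trans (hall' d0 (by simp [hL])).symm)
      have hk0 : k ≠ 0 := by
        intro h
        have h2 : ((List.filter (fun d => d.2 == true) L).length : Int) = 0 := by
          rw [← hk]; exact h
        have hall' : ∀ e ∈ L, e.2 = false := pv_filter_none.1 (by exact_mod_cast h2)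
        exact hdne' ((hall' d hd).trans (hall' d0 (by simp [hL])).symm)
      have hbound : k ≤ (L.length : Int) := by
        rw [hk]
        exact_mod_cast List.length_filter_le (fun d => d.2 == true) L
      have hneF : ¬ ((L.length : Int) - k = (L.length : Int)) := by omega
      rw [if_neg hkL, if_neg hneF, if_neg hall]
      congr 1
      by_cases hgt : k > (L.length : Int) - k
      · rw [if_pos hgt]
        have : 2 * k > (L.length : Int) := by omega
        simp [this]
      · rw [if_neg hgt]
        have : ¬ (2 * k > (L.length : Int)) := by omega
        simp [this]
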